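-- pv_equiv track=rewrite | github.com/camargodev/programming-challenges | hackerrank/1-week-prep/day-2/mock-test/flipping-matrix.py | flipping_matrix
-- ===== SOURCE A (Python) =====
-- def flipping_matrix(matrix):
--     n = len(matrix)
--     quadrant_size = n//2
--     max_sum = 0
--     for i in range(quadrant_size):
--         for j in range(quadrant_size):
--             val_1 = matrix[i][j]
--             val_2 = matrix[n-i-1][j]
--             val_3 = matrix[i][n-j-1]
--             val_4 = matrix[n-i-1][n-j-1]
--             max_val = max([val_1, val_2, val_3, val_4])
--             max_sum += max_val
--     return max_sum
-- ===== SOURCE B (Python) =====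
-- def flipping_matrix(matrix):
--     n = len(matrix)
--     h = n // 2
--     best = {}
--     for i, row in enumerate(matrix):
--         ci = min(i, n - 1 - i)
--         if ci >= h:
--             continue
--         for j in range(n):
--             cj = min(j, n - 1 - j)
--             if cj >= h:
--                 continue
--             v = row[j]
--             key = (ci, cj)
--             if key not in best or v > best[key]:
--                 best[key] = v
--     return sum(best.values())
-- ===== Notes on version B (the rewrite author's own statement) =====
-- stated objective: alternative
-- what changed: A loops over the quadrant positions and fetches the four mirrored cells per position; B makes a single pass over every cell of the matrix, maps each cell to its canonical quadrant key (min(i,n-1-i), min(j,n-1-j)), maintains a dict of running group maxima, and returns the sum of the dict's values.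
import Mathlib
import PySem

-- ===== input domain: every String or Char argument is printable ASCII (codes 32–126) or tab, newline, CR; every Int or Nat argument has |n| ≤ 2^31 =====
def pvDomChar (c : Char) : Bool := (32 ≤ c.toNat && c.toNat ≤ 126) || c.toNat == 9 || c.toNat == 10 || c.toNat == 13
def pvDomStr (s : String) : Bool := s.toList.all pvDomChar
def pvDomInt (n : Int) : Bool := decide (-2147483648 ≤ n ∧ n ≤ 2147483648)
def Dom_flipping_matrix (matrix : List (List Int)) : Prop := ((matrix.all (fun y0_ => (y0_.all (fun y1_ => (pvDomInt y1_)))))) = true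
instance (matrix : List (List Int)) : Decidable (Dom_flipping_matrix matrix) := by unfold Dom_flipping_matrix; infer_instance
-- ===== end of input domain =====

-- B replaces A's quadrant double loop with four mirrored reads per position by a single pass
-- over every cell: each cell is mapped to its canonical quadrant key (min(i,n-1-i), min(j,n-1-j)),
-- a dict of running group maxima is maintained, and the dict's values are summed (alternative).

-- ===== PORT A =====
def flipping_matrix (matrix : List (List Int)) : Int :=
  let n := PySem.List.len matrix
  let q := PySem.Int.floordiv n 2
  (PySem.List.pyRange 0 q 1).foldl (fun s i =>
    (PySem.List.pyRange 0 q 1).foldl (fun s j =>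
      let v1 := PySem.List.pyGetD (PySem.List.pyGetD matrix i []) j 0
      let v2 := PySem.List.pyGetD (PySem.List.pyGetD matrix (n - i - 1) []) j 0
      let v3 := PySem.List.pyGetD (PySem.List.pyGetD matrix i []) (n - j - 1) 0
      let v4 := PySem.List.pyGetD (PySem.List.pyGetD matrix (n - i - 1) []) (n - j - 1) 0
      s + (PySem.List.max? [v1, v2, v3, v4] (fun y => y)).getD 0) s) 0

-- ===== PORT B =====
-- the dict update 'if key not in best or v > best[key]: best[key] = v'
def pvStep (d : PySem.Dict (Int × Int) Int) (key : Int × Int) (v : Int) : PySem.Dict (Int × Int) Int :=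
  match d.get? key with
  | none => d.insert key v
  | some w => if v > w then d.insert key v else d

def flipping_matrix_alt (matrix : List (List Int)) : Int :=
  let n := PySem.List.len matrix
  let h := PySem.Int.floordiv n 2
  let best := (PySem.List.enumerate matrix).foldl (fun d p =>
    let ci := min p.1 (n - 1 - p.1)
    if h ≤ ci then d
    else (PySem.List.pyRange 0 n 1).foldl (fun d j =>
      let cj := min j (n - 1 - j)
      if h ≤ cj then d
      else pvStep d (ci, cj) (PySem.List.pyGetD p.2 j 0)) d) PySem.Dict.empty
  best.values.sum

-- ===== PRECONDITION & SPEC =====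
-- Pre_ excludes exactly the inputs where A raises IndexError: some accessed row
-- (row i or row n-1-i for i < n//2) is shorter than n = len(matrix), so a column
-- index j or n-j-1 is out of range.  A returns normally on every input in Pre_.
def Pre_flipping_matrix (matrix : List (List Int)) : Prop :=
  ∀ i ∈ List.range (matrix.length / 2),
    matrix.length ≤ (matrix.getD i []).length ∧
    matrix.length ≤ (matrix.getD (matrix.length - 1 - i) []).length
instance (matrix : List (List Int)) : Decidable (Pre_flipping_matrix matrix) := by
  unfold Pre_flipping_matrix; infer_instance

def pvWitness_flipping_matrix : List (List Int) := [[1, 2], [3, 4]]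

def Spec_flipping_matrix (matrix : List (List Int)) (out : Int) : Prop := out = flipping_matrix_alt matrix
instance (matrix : List (List Int)) (out : Int) : Decidable (Spec_flipping_matrix matrix out) := by unfold Spec_flipping_matrix; infer_instance

-- ===== CLAIM (what is proved, stated in full; the proofs are below) =====
def Claim_equal_flipping_matrix : Prop := ∀ (matrix : List (List Int)), Dom_flipping_matrix matrix → Pre_flipping_matrix matrix → Spec_flipping_matrix matrix (flipping_matrix matrix)

-- ===== LEMMAS AND PROOFS =====

-- cell access and the quadrant maxima, in Nat indices
def pvG (mx : List (List Int)) (a b : Nat) : Int := (mx.getD a []).getD b 0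

def pvCell (mx : List (List Int)) (N i j : Nat) : Int :=
  max (max (max (pvG mx i j) (pvG mx (N - 1 - i) j)) (pvG mx i (N - 1 - j)))
      (pvG mx (N - 1 - i) (N - 1 - j))

def pvKey (a b : Nat) : Int × Int := ((a : Int), (b : Int))

def pvM2 (mx : List (List Int)) (n a b : Nat) : Int := max (pvG mx a b) (pvG mx a (n - 1 - b))
def pvM4 (mx : List (List Int)) (n a b : Nat) : Int := max (pvM2 mx n a b) (pvM2 mx n (n - 1 - a) b)

-- the Nat-index model of B's cell and row steps
def pvInnerStep (mx : List (List Int)) (i : Nat) (d : PySem.Dict (Int × Int) Int) (j : Nat) :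
    PySem.Dict (Int × Int) Int :=
  if mx.length / 2 ≤ min j (mx.length - 1 - j) then d
  else pvStep d (pvKey (min i (mx.length - 1 - i)) (min j (mx.length - 1 - j))) (pvG mx i j)

def pvProcRow (mx : List (List Int)) (d : PySem.Dict (Int × Int) Int) (i : Nat) :
    PySem.Dict (Int × Int) Int :=
  if mx.length / 2 ≤ min i (mx.length - 1 - i) then d
  else (List.range mx.length).foldl (pvInnerStep mx i) d

def pvMOpt (o : Option Int) (v : Int) : Int := match o with | none => v | some w => max w v

-- ----- pvStep lemmas -----
theorem get?_pvStep_self (d : PySem.Dict (Int × Int) Int) (k : Int × Int) (v : Int) :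
    (pvStep d k v).get? k = some (pvMOpt (d.get? k) v) := by
  unfold pvStep
  cases h : d.get? k with
  | none => simp [PySem.Dict.get?_insert_self, pvMOpt]
  | some w =>
    by_cases hv : v > w
    · simp [hv, PySem.Dict.get?_insert_self, pvMOpt, max_eq_right (le_of_lt hv)]
    · simp [hv, h, pvMOpt, max_eq_left (le_of_not_gt hv)]

theorem get?_pvStep_ne (d : PySem.Dict (Int × Int) Int) (k k' : Int × Int) (v : Int)
    (h : k' ≠ k) : (pvStep d k v).get? k' = d.get? k' := by
  unfold pvStep
  cases hg : d.get? k with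
  | none => simp [PySem.Dict.get?_insert_of_ne d v h]
  | some w =>
    by_cases hv : v > w
    · simp [hv, PySem.Dict.get?_insert_of_ne d v h]
    · simp [hv]

theorem keys_pvStep (d : PySem.Dict (Int × Int) Int) (k : Int × Int) (v : Int) :
    (pvStep d k v).keys = if (d.get? k).isSome then d.keys else d.keys ++ [k] := by
  unfold pvStep
  cases hg : d.get? k with
  | none =>
    have hc : d.contains k = false := by
      rw [PySem.Dict.contains_eq_isSome_get?, hg]; rfl
    rw [PySem.Dict.keys_insert_of_not_contains d v hc]; simp
  | some w =>
    have hc : d.contains k = true := by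
      rw [PySem.Dict.contains_eq_isSome_get?, hg]; rfl
    show (if v > w then d.insert k v else d).keys = _
    by_cases hv : v > w
    · rw [if_pos hv, PySem.Dict.keys_insert_of_contains d v hc]; simp
    · simp [hv]

-- ----- reduction of the port to the Nat model -----
theorem alt_eq_model (mx : List (List Int)) :
    flipping_matrix_alt mx
      = ((List.range mx.length).foldl (pvProcRow mx) PySem.Dict.empty).values.sum := by
  have hq : PySem.Int.floordiv ((mx.length : Int)) 2 = ((mx.length / 2 : Nat) : Int) := by
    exact_mod_cast PySem.Int.floordiv_natCast mx.length 2
  simp only [flipping_matrix_alt, PySem.List.len_eq, hq]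
  rw [PySem.List.enumerate_eq_map_pyRange mx []]
  simp only [PySem.List.len_eq, PySem.List.pyRange_one, sub_zero, Int.toNat_natCast, zero_add,
    List.map_map, List.foldl_map]
  refine congrArg (fun d : PySem.Dict (Int × Int) Int => d.values.sum) ?_
  apply PySem.List.foldl_congr_mem
  intro d i hi
  have hi' : i < mx.length := List.mem_range.mp hi
  have e1 : ((mx.length : Int)) - 1 - (i : Int) = ((mx.length - 1 - i : Nat) : Int) := by omega
  simp only [Function.comp, pvProcRow, e1, PySem.List.pyGetD_natCast, ← Nat.cast_min, Nat.cast_le]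
  split_ifs with hg
  · rfl
  · apply PySem.List.foldl_congr_mem
    intro d' j hj
    have hj' : j < mx.length := List.mem_range.mp hj
    have e2 : ((mx.length : Int)) - 1 - (j : Int) = ((mx.length - 1 - j : Nat) : Int) := by omega
    simp only [e2, ← Nat.cast_min, Nat.cast_le]
    rfl

-- ----- the value accumulated at key (a,b) after the inner fold up to column m -----
def pvAfter (mx : List (List Int)) (n i b m : Nat) (o : Option Int) : Option Int :=
  if n - 1 - b < m then some (max (pvMOpt o (pvG mx i b)) (pvG mx i (n - 1 - b)))
  else if b < m then some (pvMOpt o (pvG mx i b))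
  else o

theorem pvKey_inj {a b a' b' : Nat} : pvKey a b = pvKey a' b' ↔ (a = a' ∧ b = b') := by
  simp [pvKey, Prod.ext_iff]

-- inner-loop invariant
theorem inner_invariant (mx : List (List Int)) (i : Nat)
    (d : PySem.Dict (Int × Int) Int) (m : Nat) (hm : m ≤ mx.length) :
    (∀ b, b < mx.length / 2 →
        ((List.range m).foldl (pvInnerStep mx i) d).get? (pvKey (min i (mx.length - 1 - i)) b)
          = pvAfter mx mx.length i b m (d.get? (pvKey (min i (mx.length - 1 - i)) b)))
    ∧ (∀ k', (∀ b, b < mx.length / 2 → k' ≠ pvKey (min i (mx.length - 1 - i)) b) →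
        ((List.range m).foldl (pvInnerStep mx i) d).get? k' = d.get? k')
    ∧ ((List.range m).foldl (pvInnerStep mx i) d).keys
        = d.keys ++ ((List.range (min m (mx.length / 2))).map
            (pvKey (min i (mx.length - 1 - i)))).filter (fun k => (d.get? k).isNone) := by
  induction m with
  | zero =>
    refine ⟨fun b hb => by simp [pvAfter], fun k' _ => rfl, by simp⟩
  | succ m ih =>
    obtain ⟨IH1, IH2, IH3⟩ := ih (by omega)
    have hstep : (List.range (m + 1)).foldl (pvInnerStep mx i) d
        = pvInnerStep mx i ((List.range m).foldl (pvInnerStep mx i) d) m := by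
      rw [List.range_succ, List.foldl_append]; rfl
    rw [hstep]
    by_cases c1 : m < mx.length / 2
    · -- first phase: new key (a, m)
      have hbm : min m (mx.length - 1 - m) = m := by omega
      have hred : pvInnerStep mx i ((List.range m).foldl (pvInnerStep mx i) d) m
          = pvStep ((List.range m).foldl (pvInnerStep mx i) d)
              (pvKey (min i (mx.length - 1 - i)) m) (pvG mx i m) := by
        simp [pvInnerStep, hbm, c1]
      have hFm : ((List.range m).foldl (pvInnerStep mx i) d).get?
            (pvKey (min i (mx.length - 1 - i)) m)
          = d.get? (pvKey (min i (mx.length - 1 - i)) m) := by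
        rw [IH1 m c1, pvAfter, if_neg (by omega), if_neg (by omega)]
      refine ⟨fun b hb => ?_, fun k' hk' => ?_, ?_⟩
      · by_cases hbm2 : b = m
        · subst hbm2
          rw [hred, get?_pvStep_self, hFm, pvAfter, if_neg (by omega), if_pos (by omega)]
        · rw [hred, get?_pvStep_ne _ _ _ _ (by simp [pvKey_inj, hbm2]), IH1 b hb]
          rw [pvAfter, pvAfter]
          split_ifs <;> first | rfl | omega
      · rw [hred, get?_pvStep_ne _ _ _ _ (hk' m c1), IH2 k' hk']
      · rw [hred, keys_pvStep, hFm, IH3]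
        have e1 : min (m + 1) (mx.length / 2) = m + 1 := by omega
        have e2 : min m (mx.length / 2) = m := by omega
        rw [e1, e2, List.range_succ, List.map_append, List.filter_append]
        cases hdg : d.get? (pvKey (min i (mx.length - 1 - i)) m) with
        | none => simp [hdg, List.append_assoc]
        | some w => simp [hdg]
    · by_cases c2 : m < mx.length - mx.length / 2
      · -- middle: skipped column
        have hguard : mx.length / 2 ≤ min m (mx.length - 1 - m) := by omega
        have hred : pvInnerStep mx i ((List.range m).foldl (pvInnerStep mx i) d) m
            = (List.range m).foldl (pvInnerStep mx i) d := by
          simp [pvInnerStep, hguard]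
        refine ⟨fun b hb => ?_, fun k' hk' => ?_, ?_⟩
        · rw [hred, IH1 b hb, pvAfter, pvAfter]
          split_ifs <;> first | rfl | omega
        · rw [hred, IH2 k' hk']
        · rw [hred, IH3]
          have e1 : min (m + 1) (mx.length / 2) = mx.length / 2 := by omega
          have e2 : min m (mx.length / 2) = mx.length / 2 := by omega
          rw [e1, e2]
      · -- second phase: mirrored column, key (a, mx.length - 1 - m)
        have hmn : m < mx.length := by omega
        have hbm : min m (mx.length - 1 - m) = mx.length - 1 - m := by omega
        have hb0 : mx.length - 1 - m < mx.length / 2 := by omega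
        have hred : pvInnerStep mx i ((List.range m).foldl (pvInnerStep mx i) d) m
            = pvStep ((List.range m).foldl (pvInnerStep mx i) d)
                (pvKey (min i (mx.length - 1 - i)) (mx.length - 1 - m)) (pvG mx i m) := by
          simp [pvInnerStep, hbm, Nat.not_le.mpr hb0]
        have hFm : ((List.range m).foldl (pvInnerStep mx i) d).get?
              (pvKey (min i (mx.length - 1 - i)) (mx.length - 1 - m))
            = some (pvMOpt (d.get? (pvKey (min i (mx.length - 1 - i)) (mx.length - 1 - m)))
                (pvG mx i (mx.length - 1 - m))) := by
          rw [IH1 _ hb0, pvAfter, if_neg (by omega), if_pos (by omega)]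
        refine ⟨fun b hb => ?_, fun k' hk' => ?_, ?_⟩
        · by_cases hbm2 : b = mx.length - 1 - m
          · subst hbm2
            rw [hred, get?_pvStep_self, hFm, pvAfter, if_pos (by omega)]
            have em : mx.length - 1 - (mx.length - 1 - m) = m := by omega
            simp [pvMOpt, em]
          · rw [hred, get?_pvStep_ne _ _ _ _ (by simp [pvKey_inj, hbm2]), IH1 b hb]
            rw [pvAfter, pvAfter]
            split_ifs <;> first | rfl | omega
        · rw [hred, get?_pvStep_ne _ _ _ _ (hk' _ hb0), IH2 k' hk']
        · rw [hred, keys_pvStep, hFm, IH3]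
          have e1 : min (m + 1) (mx.length / 2) = mx.length / 2 := by omega
          have e2 : min m (mx.length / 2) = mx.length / 2 := by omega
          rw [e1, e2]
          simp

-- outer-loop invariant
theorem outer_invariant (mx : List (List Int)) (k : Nat) (hk : k ≤ mx.length) :
    (∀ a b, a < mx.length / 2 → b < mx.length / 2 →
        ((List.range k).foldl (pvProcRow mx) PySem.Dict.empty).get? (pvKey a b)
          = if a < k then some (if mx.length - 1 - a < k then pvM4 mx mx.length a b
                                else pvM2 mx mx.length a b) else none)
    ∧ (∀ k', (∀ a b, a < mx.length / 2 → b < mx.length / 2 → k' ≠ pvKey a b) →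
        ((List.range k).foldl (pvProcRow mx) PySem.Dict.empty).get? k' = none)
    ∧ ((List.range k).foldl (pvProcRow mx) PySem.Dict.empty).keys
        = (List.range (min k (mx.length / 2))).flatMap
            (fun a => (List.range (mx.length / 2)).map (pvKey a)) := by
  induction k with
  | zero =>
    refine ⟨fun a b _ _ => by simp [PySem.Dict.get?_empty], fun k' _ => by simp [PySem.Dict.get?_empty], by simp⟩
  | succ k ih =>
    obtain ⟨IH1, IH2, IH3⟩ := ih (by omega)
    have hstep : (List.range (k + 1)).foldl (pvProcRow mx) PySem.Dict.empty
        = pvProcRow mx ((List.range k).foldl (pvProcRow mx) PySem.Dict.empty) k := by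
      rw [List.range_succ, List.foldl_append]; rfl
    rw [hstep]
    by_cases c1 : k < mx.length / 2
    · -- top row: fresh keys (k, b)
      have hak : min k (mx.length - 1 - k) = k := by omega
      have hred : pvProcRow mx ((List.range k).foldl (pvProcRow mx) PySem.Dict.empty) k
          = (List.range mx.length).foldl (pvInnerStep mx k)
              ((List.range k).foldl (pvProcRow mx) PySem.Dict.empty) := by
        simp [pvProcRow, hak, c1]
      obtain ⟨J1, J2, J3⟩ := inner_invariant mx k
        ((List.range k).foldl (pvProcRow mx) PySem.Dict.empty) mx.length le_rfl
      rw [hak] at J1 J2 J3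
      refine ⟨fun a b hah hbh => ?_, fun k' hk' => ?_, ?_⟩
      · by_cases hak2 : a = k
        · subst hak2
          rw [hred, J1 b hbh, IH1 a b hah hbh, if_neg (by omega)]
          rw [pvAfter, if_pos (by omega), if_pos (by omega), if_neg (by omega)]
          simp [pvMOpt, pvM2]
        · rw [hred, J2 _ (fun b' hb' => by simp [pvKey_inj, hak2]), IH1 a b hah hbh]
          split_ifs <;> first | rfl | omega
      · rw [hred, J2 k' (fun b' hb' => hk' k b' c1 hb'), IH2 k' hk']
      · rw [hred, J3, IH3]
        have e1 : min (k + 1) (mx.length / 2) = k + 1 := by omega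
        have e2 : min k (mx.length / 2) = k := by omega
        have e3 : min mx.length (mx.length / 2) = mx.length / 2 := by omega
        have hf : List.filter
              (fun x => (((List.range k).foldl (pvProcRow mx) PySem.Dict.empty).get? x).isNone)
              (List.map (pvKey k) (List.range (mx.length / 2)))
            = List.map (pvKey k) (List.range (mx.length / 2)) := by
          apply List.filter_eq_self.mpr
          intro x hx
          obtain ⟨b, hb, rfl⟩ := List.mem_map.mp hx
          rw [IH1 k b c1 (List.mem_range.mp hb), if_neg (by omega)]
          rfl
        rw [e1, e2, e3, hf, List.range_succ, List.flatMap_append]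
        simp
    · by_cases c2 : k < mx.length - mx.length / 2
      · -- middle row: skipped
        have hguard : mx.length / 2 ≤ min k (mx.length - 1 - k) := by omega
        have hred : pvProcRow mx ((List.range k).foldl (pvProcRow mx) PySem.Dict.empty) k
            = (List.range k).foldl (pvProcRow mx) PySem.Dict.empty := by
          simp [pvProcRow, hguard]
        refine ⟨fun a b hah hbh => ?_, fun k' hk' => ?_, ?_⟩
        · rw [hred, IH1 a b hah hbh]
          split_ifs <;> first | rfl | omega
        · rw [hred, IH2 k' hk']
        · rw [hred, IH3]
          have e1 : min (k + 1) (mx.length / 2) = mx.length / 2 := by omega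
          have e2 : min k (mx.length / 2) = mx.length / 2 := by omega
          rw [e1, e2]
      · -- bottom row: updates keys (mx.length - 1 - k, b)
        have hkn : k < mx.length := by omega
        have hak : min k (mx.length - 1 - k) = mx.length - 1 - k := by omega
        have ha0 : mx.length - 1 - k < mx.length / 2 := by omega
        have hred : pvProcRow mx ((List.range k).foldl (pvProcRow mx) PySem.Dict.empty) k
            = (List.range mx.length).foldl (pvInnerStep mx k)
                ((List.range k).foldl (pvProcRow mx) PySem.Dict.empty) := by
          simp [pvProcRow, hak, Nat.not_le.mpr ha0]
        obtain ⟨J1, J2, J3⟩ := inner_invariant mx k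
          ((List.range k).foldl (pvProcRow mx) PySem.Dict.empty) mx.length le_rfl
        rw [hak] at J1 J2 J3
        refine ⟨fun a b hah hbh => ?_, fun k' hk' => ?_, ?_⟩
        · by_cases hak2 : a = mx.length - 1 - k
          · subst hak2
            rw [hred, J1 b hbh, IH1 _ b hah hbh, if_pos (by omega), if_neg (by omega)]
            rw [pvAfter, if_pos (by omega), if_pos (by omega), if_pos (by omega)]
            have ekk : mx.length - 1 - (mx.length - 1 - k) = k := by omega
            simp only [pvMOpt, pvM4, ekk, pvM2]
            rw [max_assoc]
          · rw [hred, J2 _ (fun b' hb' => by simp [pvKey_inj, hak2]), IH1 a b hah hbh]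
            split_ifs <;> first | rfl | omega
        · rw [hred, J2 k' (fun b' hb' => hk' _ b' ha0 hb'), IH2 k' hk']
        · rw [hred, J3, IH3]
          have e1 : min (k + 1) (mx.length / 2) = mx.length / 2 := by omega
          have e2 : min k (mx.length / 2) = mx.length / 2 := by omega
          have e3 : min mx.length (mx.length / 2) = mx.length / 2 := by omega
          have hf : List.filter
                (fun x => (((List.range k).foldl (pvProcRow mx) PySem.Dict.empty).get? x).isNone)
                (List.map (pvKey (mx.length - 1 - k)) (List.range (mx.length / 2)))
              = [] := by
            apply List.filter_eq_nil_iff.mpr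
            intro x hx
            obtain ⟨b, hb, rfl⟩ := List.mem_map.mp hx
            rw [IH1 _ b ha0 (List.mem_range.mp hb), if_pos (by omega)]
            simp
          rw [e1, e2, e3, hf]
          simp

theorem pv_foldl_foldl_add {α β : Type} (l1 : List α) (l2 : List β) (g : α → β → Int) (init : Int) :
    l1.foldl (fun s i => l2.foldl (fun s j => s + g i j) s) init
      = init + (l1.map (fun i => (l2.map (g i)).sum)).sum := by
  induction l1 generalizing init with
  | nil => simp
  | cons x xs ih =>
    simp only [List.foldl_cons, List.map_cons, List.sum_cons]
    rw [PySem.List.foldl_add, ih]; ring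

-- A as the canonical double sum (same shape as the model's final value)
theorem flipping_matrix_eq_sum (matrix : List (List Int)) :
    flipping_matrix matrix
      = ((List.range (matrix.length / 2)).map (fun i =>
          ((List.range (matrix.length / 2)).map (fun j =>
            pvCell matrix matrix.length i j)).sum)).sum := by
  have hq : PySem.Int.floordiv ((matrix.length : Int)) 2 = ((matrix.length / 2 : Nat) : Int) := by
    exact_mod_cast PySem.Int.floordiv_natCast matrix.length 2
  simp only [flipping_matrix, PySem.List.len_eq, hq, PySem.List.pyRange_one]
  simp only [sub_zero, Int.toNat_natCast, zero_add]
  rw [pv_foldl_foldl_add]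
  simp only [zero_add, List.map_map]
  apply congrArg List.sum
  apply List.map_congr_left
  intro i hi
  apply congrArg List.sum
  apply List.map_congr_left
  intro j hj
  have hiq := List.mem_range.mp hi
  have hjq := List.mem_range.mp hj
  have hiN : i < matrix.length := lt_of_lt_of_le hiq (Nat.div_le_self _ _)
  have hjN : j < matrix.length := lt_of_lt_of_le hjq (Nat.div_le_self _ _)
  have ei : (matrix.length : Int) - (i : Int) - 1 = ((matrix.length - 1 - i : Nat) : Int) := by omega
  have ej : (matrix.length : Int) - (j : Int) - 1 = ((matrix.length - 1 - j : Nat) : Int) := by omega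
  simp only [Function.comp, ei, ej, PySem.List.pyGetD_natCast]
  rw [PySem.List.max?_id_cons]
  simp [List.foldl, pvCell, pvG]

theorem pv_sum_flatMap {α : Type} (l : List α) (f : α → List Int) :
    (l.flatMap f).sum = (l.map fun a => (f a).sum).sum := by
  induction l with
  | nil => rfl
  | cons x xs ih => simp [ih]

theorem pv_nodup_keys (h1 h2 : Nat) :
    ((List.range h1).flatMap (fun a => (List.range h2).map (pvKey a))).Nodup := by
  have hrw : (List.range h1).flatMap (fun a => (List.range h2).map (pvKey a))
      = ((List.range h1) ×ˢ (List.range h2)).map (fun p => pvKey p.1 p.2) := by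
    simp only [SProd.sprod, List.product, List.map_flatMap, List.map_map]
    rfl
  have hinj : Function.Injective (fun p : Nat × Nat => pvKey p.1 p.2) := by
    intro p q hpq
    obtain ⟨h1', h2'⟩ := pvKey_inj.mp hpq
    exact Prod.ext h1' h2'
  rw [hrw]
  exact List.Nodup.map hinj (List.Nodup.product List.nodup_range List.nodup_range)

-- ===== VERDICT (by name: the statement is the Claim_ definition above) =====
theorem flipping_matrix_spec : Claim_equal_flipping_matrix := by
  intro mx _ _
  unfold Spec_flipping_matrix
  rw [flipping_matrix_eq_sum, alt_eq_model]
  obtain ⟨O1, O2, O3⟩ := outer_invariant mx mx.length le_rfl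
  have e3 : min mx.length (mx.length / 2) = mx.length / 2 := by omega
  rw [e3] at O3
  have hnodup : ((List.range mx.length).foldl (pvProcRow mx) PySem.Dict.empty).keys.Nodup := by
    rw [O3]; exact pv_nodup_keys _ _
  rw [PySem.Dict.values_eq_map_keys _ hnodup 0, O3, List.map_flatMap]
  rw [pv_sum_flatMap]
  simp only [List.map_map]
  apply congrArg List.sum
  apply List.map_congr_left
  intro a hamem
  apply congrArg List.sum
  apply List.map_congr_left
  intro b hbmem
  have hah := List.mem_range.mp hamem
  have hbh := List.mem_range.mp hbmem
  simp only [Function.comp]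
  rw [PySem.Dict.getD_eq_get?_getD, O1 a b hah hbh, if_pos (by omega), if_pos (by omega)]
  show pvCell mx mx.length a b = pvM4 mx mx.length a b
  unfold pvCell pvM4 pvM2
  rw [max_assoc, max_max_max_comm]
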